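-- pv_equiv track=rewrite | github.com/boj/iris | benchmark/binary-trees/binary-trees.py | flat_tree_check
-- ===== SOURCE A (Python) =====
-- def flat_tree_check(tree, depth):
--     """Compute checksum bottom-up. Leaf = value, Branch = value + left - right."""
--     size = len(tree)
--     checks = list(tree)  # Start with node values (correct for leaves)
--     # Process levels from deepest internal to root
--     for level in range(depth - 1, -1, -1):
--         level_start = 2 ** level - 1
--         level_end = 2 ** (level + 1) - 1
--         for i in range(level_start, level_end):
--             left_idx = 2 * i + 1
--             right_idx = 2 * i + 2
--             if left_idx < size:
--                 checks[i] = tree[i] + checks[left_idx] - checks[right_idx]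
--     return checks[0]
-- ===== SOURCE B (Python) =====
-- def flat_tree_check(tree, depth):
--     """Compute checksum top-down by recursion on the array-encoded tree."""
--     def check(i, level):
--         left = 2 * i + 1
--         if level >= depth or left >= len(tree):
--             return tree[i]
--         return tree[i] + check(left, level + 1) - check(left + 1, level + 1)
--     return check(0, 0)
-- ===== Notes on version B (the rewrite author's own statement) =====
-- stated objective: alternative
-- what changed: Replaces A's bottom-up level-by-level fill of a mutable checks array with a top-down recursive check(i, level) over the array-encoded heap that visits only nodes actually present, instead of scanning all 2^depth-1 internal slots.
import Mathlib
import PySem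

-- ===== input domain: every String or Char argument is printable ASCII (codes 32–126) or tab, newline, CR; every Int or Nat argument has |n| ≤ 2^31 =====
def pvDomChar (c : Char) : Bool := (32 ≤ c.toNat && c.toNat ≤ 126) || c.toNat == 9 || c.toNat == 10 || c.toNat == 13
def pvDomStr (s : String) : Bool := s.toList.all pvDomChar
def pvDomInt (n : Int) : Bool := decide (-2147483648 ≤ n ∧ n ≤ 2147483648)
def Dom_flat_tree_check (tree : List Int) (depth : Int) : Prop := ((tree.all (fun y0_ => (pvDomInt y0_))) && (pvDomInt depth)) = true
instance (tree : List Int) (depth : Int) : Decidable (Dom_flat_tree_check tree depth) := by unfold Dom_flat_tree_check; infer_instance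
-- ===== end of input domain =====

-- B replaces A's bottom-up fill of a mutable checks array (scanning every heap slot of every
-- level) by a top-down recursion check(i, level) over the array-encoded tree; same value, no
-- array. Equivalence is about the return value; neither program mutates its arguments.

-- ===== PORT A =====
-- body of the inner loop: checks[i] = tree[i] + checks[left] - checks[right] when left in range
-- (indices i, left are in range whenever the guard holds and Pre_ holds; right is in range by Pre_)
def ftcStep (tree : List Int) (checks : List Int) (i : Int) : List Int :=
  let left_idx := 2 * i + 1
  let right_idx := 2 * i + 2
  if left_idx < (tree.length : Int) then
    PySem.List.pySetD checks i
      (PySem.List.pyGetD tree i 0 + PySem.List.pyGetD checks left_idx 0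
        - PySem.List.pyGetD checks right_idx 0)
  else checks

-- one pass of the outer loop; level comes from range(depth-1, -1, -1) so level ≥ 0 and
-- 2 ** level is exactly (2 : Int) ^ level.toNat
def ftcLevel (tree : List Int) (checks : List Int) (level : Int) : List Int :=
  let level_start : Int := (2 : Int) ^ level.toNat - 1
  let level_end : Int := (2 : Int) ^ (level.toNat + 1) - 1
  (PySem.List.pyRange level_start level_end 1).foldl (ftcStep tree) checks

def flat_tree_check (tree : List Int) (depth : Int) : Int :=
  let checks := (PySem.List.pyRange (depth - 1) (-1) (-1)).foldl (ftcLevel tree) tree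
  PySem.List.pyGetD checks 0 0   -- checks[0]; Pre_ excludes tree = [] (IndexError)

-- ===== PORT B =====
-- check(i, level) of Source B; tree[i] is in range whenever Pre_ holds
def ftcCheck (tree : List Int) (depth : Int) (i : Int) (level : Int) : Int :=
  let left := 2 * i + 1
  if _h : depth ≤ level ∨ (tree.length : Int) ≤ left then
    PySem.List.pyGetD tree i 0
  else
    PySem.List.pyGetD tree i 0 + ftcCheck tree depth left (level + 1)
      - ftcCheck tree depth (left + 1) (level + 1)
termination_by (depth - level).toNat
decreasing_by
  · omega
  · omega

def flat_tree_check_alt (tree : List Int) (depth : Int) : Int :=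
  ftcCheck tree depth 0 0

-- ===== PRECONDITION & SPEC =====
-- Pre_ is exactly the set of inputs on which the Python A returns: A raises IndexError on the
-- empty tree (checks[0]) and, when some processed node has its left child in range but not its
-- right (possible only for an even-length tree shorter than 2^(depth+1)), on checks[right_idx].
def Pre_flat_tree_check (tree : List Int) (depth : Int) : Prop :=
  tree ≠ [] ∧ (depth ≤ 0 ∨ tree.length % 2 = 1 ∨ (2 : Nat) ^ ((depth + 1).toNat) ≤ tree.length)
instance (tree : List Int) (depth : Int) : Decidable (Pre_flat_tree_check tree depth) := by
  unfold Pre_flat_tree_check; infer_instance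

def pvWitness_flat_tree_check : List Int × Int := ([1, 2, 3], 1)

def Spec_flat_tree_check (tree : List Int) (depth : Int) (out : Int) : Prop := out = flat_tree_check_alt tree depth
instance (tree : List Int) (depth : Int) (out : Int) : Decidable (Spec_flat_tree_check tree depth out) := by unfold Spec_flat_tree_check; infer_instance

-- ===== CLAIM (what is proved, stated in full; the proofs are below) =====
def Claim_equal_flat_tree_check : Prop := ∀ (tree : List Int) (depth : Int), Dom_flat_tree_check tree depth → Pre_flat_tree_check tree depth → Spec_flat_tree_check tree depth (flat_tree_check tree depth)

-- ===== LEMMAS AND PROOFS =====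

-- B's value at node j, called at j's canonical level log2(j+1)
def ftcChk (tree : List Int) (depth : Int) (j : Nat) : Int :=
  ftcCheck tree depth (j : Int) (((j + 1).log2 : Nat) : Int)

-- loop invariant: after processing levels depth-1 … l, slot j holds B's value when j's level ≥ l
def ftcInv (tree : List Int) (depth : Int) (l : Nat) (R : List Int) : Prop :=
  R.length = tree.length ∧
    ∀ j : Nat, j < tree.length →
      PySem.List.pyGetD R ((j : Nat) : Int) 0 =
        if l ≤ (j + 1).log2 then ftcChk tree depth j else PySem.List.pyGetD tree ((j : Nat) : Int) 0

theorem ftcCheck_leaf (tree : List Int) (depth i level : Int)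
    (h : depth ≤ level ∨ (tree.length : Int) ≤ 2 * i + 1) :
    ftcCheck tree depth i level = PySem.List.pyGetD tree i 0 := by
  rw [ftcCheck]; simp only [dif_pos h]

theorem ftcCheck_node (tree : List Int) (depth i level : Int)
    (h1 : level < depth) (h2 : 2 * i + 1 < (tree.length : Int)) :
    ftcCheck tree depth i level =
      PySem.List.pyGetD tree i 0 + ftcCheck tree depth (2 * i + 1) (level + 1)
        - ftcCheck tree depth (2 * i + 2) (level + 1) := by
  rw [ftcCheck]
  have h : ¬ (depth ≤ level ∨ (tree.length : Int) ≤ 2 * i + 1) := by omega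
  simp only [dif_neg h]
  ring_nf

theorem log2_eq_iff (n l : Nat) (hn : 1 ≤ n) :
    n.log2 = l ↔ 2 ^ l ≤ n ∧ n < 2 ^ (l + 1) := by
  rw [Nat.log2_eq_log_two]
  exact Nat.log_eq_iff (Or.inr ⟨one_lt_two, by omega⟩)

theorem log2_self (n : Nat) (hn : 1 ≤ n) :
    2 ^ n.log2 ≤ n ∧ n < 2 ^ (n.log2 + 1) :=
  (log2_eq_iff n n.log2 hn).mp rfl

theorem log2_left (j : Nat) : (2 * j + 2).log2 = (j + 1).log2 + 1 := by
  have h := log2_self (j + 1) (by omega)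
  rw [log2_eq_iff _ _ (by omega)]
  constructor
  · rw [pow_succ]; omega
  · rw [pow_succ, pow_succ]; omega

theorem log2_right (j : Nat) : (2 * j + 3).log2 = (j + 1).log2 + 1 := by
  have h := log2_self (j + 1) (by omega)
  rw [log2_eq_iff _ _ (by omega)]
  constructor
  · rw [pow_succ]; omega
  · rw [pow_succ, pow_succ]; omega

theorem ftcStep_length (tree R : List Int) (i : Int) :
    (ftcStep tree R i).length = R.length := by
  unfold ftcStep
  dsimp only
  split_ifs with h
  · simp [PySem.List.length_pySetD]
  · rfl

theorem ftcFold_length (tree : List Int) (is : List Int) (R : List Int) :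
    (is.foldl (ftcStep tree) R).length = R.length := by
  induction is generalizing R with
  | nil => rfl
  | cons a as ih => simp [List.foldl_cons, ih, ftcStep_length]

-- characterization of the inner loop over range(a, a+k): with k ≤ a+1 the reads 2j+1, 2j+2 are
-- beyond every written slot, so the pass acts as a parallel update
theorem ftcInner_char (tree : List Int) (k : Nat) :
    ∀ (a : Int) (R : List Int), 0 ≤ a → R.length = tree.length → (k : Int) ≤ a + 1 →
    ∀ j : Int, 0 ≤ j →
      PySem.List.pyGetD ((PySem.List.pyRange a (a + (k : Int)) 1).foldl (ftcStep tree) R) j 0 =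
        if a ≤ j ∧ j < a + (k : Int) ∧ 2 * j + 1 < (tree.length : Int) then
          PySem.List.pyGetD tree j 0 + PySem.List.pyGetD R (2 * j + 1) 0
            - PySem.List.pyGetD R (2 * j + 2) 0
        else PySem.List.pyGetD R j 0 := by
  induction k with
  | zero =>
    intro a R ha hR hk j hj
    simp only [Nat.cast_zero, add_zero]
    rw [PySem.List.pyRange_one_eq_nil le_rfl]
    simp only [List.foldl_nil]
    rw [if_neg (by omega)]
  | succ k ih =>
    intro a R ha hR hk j hj
    have hcast : ((k + 1 : Nat) : Int) = (k : Int) + 1 := by push_cast; ring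
    rw [hcast]
    have hcons : PySem.List.pyRange a (a + ((k : Int) + 1)) 1
        = a :: PySem.List.pyRange (a + 1) ((a + 1) + (k : Int)) 1 := by
      rw [PySem.List.pyRange_one_cons (by omega)]
      ring_nf
    rw [hcons, List.foldl_cons]
    have hlen' : (ftcStep tree R a).length = tree.length := by rw [ftcStep_length, hR]
    rw [ih (a + 1) (ftcStep tree R a) (by omega) hlen' (by omega) j hj]
    have hread : ∀ m : Int, 0 ≤ m → m ≠ a →
        PySem.List.pyGetD (ftcStep tree R a) m 0 = PySem.List.pyGetD R m 0 := by
      intro m hm hmne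
      unfold ftcStep
      dsimp only
      split_ifs with hg
      · have haN : a = ((a.toNat : Nat) : Int) := by omega
        have hmN : m = ((m.toNat : Nat) : Int) := by omega
        rw [haN, hmN, PySem.List.pyGetD_pySetD_natCast R a.toNat m.toNat _ _ (by omega)]
        rw [if_neg (by omega)]
      · rfl
    have hwrite : PySem.List.pyGetD (ftcStep tree R a) a 0 =
        if 2 * a + 1 < (tree.length : Int) then
          PySem.List.pyGetD tree a 0 + PySem.List.pyGetD R (2 * a + 1) 0
            - PySem.List.pyGetD R (2 * a + 2) 0
        else PySem.List.pyGetD R a 0 := by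
      unfold ftcStep
      dsimp only
      split_ifs with hg
      · have haN : a = ((a.toNat : Nat) : Int) := by omega
        rw [haN, PySem.List.pyGetD_pySetD_natCast R a.toNat a.toNat _ _ (by omega)]
        rw [if_pos rfl]
      · rfl
    by_cases hja : j = a
    · subst hja
      rw [if_neg (by omega), hwrite]
      by_cases hg : 2 * j + 1 < (tree.length : Int)
      · rw [if_pos hg, if_pos ⟨le_rfl, by omega, hg⟩]
      · rw [if_neg hg, if_neg (by omega)]
    · by_cases hc : (a + 1 ≤ j ∧ j < (a + 1) + (k : Int) ∧ 2 * j + 1 < (tree.length : Int))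
      · rw [if_pos hc, if_pos (by omega : a ≤ j ∧ j < a + ((k : Int) + 1) ∧ 2 * j + 1 < (tree.length : Int))]
        rw [hread (2 * j + 1) (by omega) (by omega), hread (2 * j + 2) (by omega) (by omega)]
      · rw [if_neg hc, hread j hj hja, if_neg (by omega)]

-- characterization of one level pass
theorem ftcLevel_char (tree : List Int) (l : Nat) (R : List Int) (hR : R.length = tree.length)
    (j : Int) (hj : 0 ≤ j) :
    PySem.List.pyGetD (ftcLevel tree R (l : Int)) j 0 =
      if ((2 : Int) ^ l - 1) ≤ j ∧ j < (2 : Int) ^ (l + 1) - 1 ∧ 2 * j + 1 < (tree.length : Int) then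
        PySem.List.pyGetD tree j 0 + PySem.List.pyGetD R (2 * j + 1) 0
          - PySem.List.pyGetD R (2 * j + 2) 0
      else PySem.List.pyGetD R j 0 := by
  unfold ftcLevel
  dsimp only
  rw [Int.toNat_natCast]
  have hk : ((2 ^ l : Nat) : Int) = (2 : Int) ^ l := by push_cast; ring
  have hpow : (1 : Int) ≤ (2 : Int) ^ l := one_le_pow₀ (by omega)
  have hrange : (2 : Int) ^ (l + 1) - 1 = ((2 : Int) ^ l - 1) + ((2 ^ l : Nat) : Int) := by
    rw [hk, pow_succ]; ring
  rw [hrange]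
  rw [ftcInner_char tree (2 ^ l) ((2 : Int) ^ l - 1) R (by linarith) hR (by rw [hk]; linarith) j hj]

theorem ftcLevel_length (tree R : List Int) (level : Int) :
    (ftcLevel tree R level).length = R.length := by
  unfold ftcLevel; exact ftcFold_length tree _ R

theorem ftcStep_inv (tree : List Int) (depth : Int) (l : Nat) (R : List Int)
    (hl : (l : Int) < depth) (hpre : Pre_flat_tree_check tree depth)
    (hinv : ftcInv tree depth (l + 1) R) :
    ftcInv tree depth l (ftcLevel tree R (l : Int)) := by
  obtain ⟨hlenR, hinv⟩ := hinv
  refine ⟨by rw [ftcLevel_length, hlenR], fun j hj => ?_⟩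
  rw [ftcLevel_char tree l R hlenR (j : Int) (by omega)]
  have hself := log2_self (j + 1) (by omega)
  by_cases hcond : ((2 : Int) ^ l - 1 ≤ (j : Int) ∧ (j : Int) < (2 : Int) ^ (l + 1) - 1 ∧
      2 * (j : Int) + 1 < (tree.length : Int))
  · rw [if_pos hcond]
    obtain ⟨hc1, hc2, hc3⟩ := hcond
    have hcast1 : ((2 ^ l : Nat) : Int) = (2 : Int) ^ l := by push_cast; ring
    have hcast2 : ((2 ^ (l + 1) : Nat) : Int) = (2 : Int) ^ (l + 1) := by push_cast; ring
    have hlo : 2 ^ l ≤ j + 1 := by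
      rw [← Nat.cast_le (α := Int)]; push_cast; rw [hcast1] at *; linarith
    have hhi : j + 1 < 2 ^ (l + 1) := by
      rw [← Nat.cast_lt (α := Int)]; push_cast; rw [hcast2] at *; linarith
    have hLl : (j + 1).log2 = l := (log2_eq_iff (j + 1) l (by omega)).mpr ⟨hlo, hhi⟩
    have hleft : 2 * j + 1 < tree.length := by
      rw [← Nat.cast_lt (α := Int)]; push_cast; linarith
    -- Pre_ guarantees the right child is in range too
    have hright : 2 * j + 2 < tree.length := by
      rcases hpre.2 with hd | hodd | hbig
      · omega
      · omega
      · have hd1 : (depth + 1).toNat = depth.toNat + 1 := by omega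
        have hld : l + 1 ≤ depth.toNat := by omega
        have hmono : (2 : Nat) ^ (l + 1) ≤ 2 ^ depth.toNat :=
          Nat.pow_le_pow_right (by omega) hld
        rw [hd1, pow_succ] at hbig
        omega
    have hcl := hinv (2 * j + 1) (by omega)
    have hcr := hinv (2 * j + 2) (by omega)
    rw [if_pos (by rw [show 2 * j + 1 + 1 = 2 * j + 2 by omega, log2_left, hLl]) ] at hcl
    rw [if_pos (by rw [show 2 * j + 2 + 1 = 2 * j + 3 by omega, log2_right, hLl]) ] at hcr
    have e1 : (2 * (j : Int) + 1) = ((2 * j + 1 : Nat) : Int) := by push_cast; ring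
    have e2 : (2 * (j : Int) + 2) = ((2 * j + 2 : Nat) : Int) := by push_cast; ring
    rw [e1, e2, hcl, hcr]
    rw [if_pos (by omega : l ≤ (j + 1).log2)]
    unfold ftcChk
    rw [hLl]
    rw [ftcCheck_node tree depth (j : Int) (l : Int) hl hc3]
    rw [show 2 * j + 1 + 1 = 2 * j + 2 by omega, log2_left, hLl]
    rw [show 2 * j + 2 + 1 = 2 * j + 3 by omega, log2_right, hLl]
    push_cast
    ring
  · rw [if_neg hcond, hinv j hj]
    by_cases h1 : l + 1 ≤ (j + 1).log2
    · rw [if_pos h1, if_pos (by omega)]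
    · by_cases h2 : l ≤ (j + 1).log2
      · have hLl : (j + 1).log2 = l := by omega
        rw [hLl] at hself
        have hr1 : (2 : Int) ^ l - 1 ≤ (j : Int) := by
          have : ((2 ^ l : Nat) : Int) ≤ ((j + 1 : Nat) : Int) := by exact_mod_cast hself.1
          push_cast at this; linarith
        have hr2 : (j : Int) < (2 : Int) ^ (l + 1) - 1 := by
          have : ((j + 1 : Nat) : Int) < ((2 ^ (l + 1) : Nat) : Int) := by exact_mod_cast hself.2
          push_cast at this; linarith
        have hn : ¬ (2 * (j : Int) + 1 < (tree.length : Int)) := by tauto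
        rw [if_neg h1, if_pos h2]
        unfold ftcChk
        rw [hLl, ftcCheck_leaf tree depth (j : Int) (l : Int) (Or.inr (by omega))]
      · rw [if_neg h1, if_neg h2]

theorem ftcOuter (tree : List Int) (depth : Int) (l : Nat) :
    ∀ R : List Int, (l : Int) ≤ depth → Pre_flat_tree_check tree depth →
      ftcInv tree depth l R →
      ftcInv tree depth 0 ((PySem.List.pyRange ((l : Int) - 1) (-1) (-1)).foldl (ftcLevel tree) R) := by
  induction l with
  | zero =>
    intro R _ _ hinv
    rw [PySem.List.pyRange_neg_one_eq_nil (by omega)]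
    exact hinv
  | succ l ih =>
    intro R hle hpre hinv
    have hcons : PySem.List.pyRange (((l + 1 : Nat) : Int) - 1) (-1) (-1)
        = ((l : Nat) : Int) :: PySem.List.pyRange (((l : Nat) : Int) - 1) (-1) (-1) := by
      push_cast
      rw [PySem.List.pyRange_neg_one_cons (by omega)]
      ring_nf
    rw [hcons, List.foldl_cons]
    exact ih (ftcLevel tree R ((l : Nat) : Int)) (by omega) hpre
      (ftcStep_inv tree depth l R (by omega) hpre hinv)

theorem ftcInv_init (tree : List Int) (depth : Int) :
    ftcInv tree depth depth.toNat tree := by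
  refine ⟨rfl, fun j hj => ?_⟩
  split_ifs with h
  · unfold ftcChk
    rw [ftcCheck_leaf]
    left; omega
  · rfl

-- ===== VERDICT (by name: the statement is the Claim_ definition above) =====
theorem flat_tree_check_spec : Claim_equal_flat_tree_check := by
  intro tree depth _ hpre
  unfold Spec_flat_tree_check flat_tree_check flat_tree_check_alt
  have hne : tree ≠ [] := hpre.1
  have hlen : 0 < tree.length := List.length_pos_of_ne_nil hne
  by_cases hd : depth ≤ 0
  · rw [PySem.List.pyRange_neg_one_eq_nil (by omega)]
    simp only [List.foldl_nil]
    rw [ftcCheck_leaf tree depth 0 0 (by omega)]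
  · have hd' : ((depth.toNat : Nat) : Int) = depth := by omega
    have hinv := ftcOuter tree depth depth.toNat tree (by omega) hpre
      (ftcInv_init tree depth)
    rw [hd'] at hinv
    have h0 := hinv.2 0 hlen
    simp only [Nat.cast_zero] at h0
    rw [h0]
    simp only [Nat.log2, Nat.zero_le, if_pos]
    unfold ftcChk
    norm_num
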